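-- pv_equiv track=rewrite | github.com/azarankin/interview_questions | problem_solving/p0007.getMaximumLength_optimized.py | getMaximumLength
-- ===== SOURCE A (Python) =====
-- def getMaximumLength(sensorData):
--     #sensorData = arr[] {0, 10, 31, 0, 2, 0, 6, 0 }
--     first_occurrence = {}
--     current_diff = 0
--     max_len = 0
--
--     for i, val in enumerate(sensorData):
--         if val > 0:
--             current_diff += 1
--         else:
--             current_diff -= 1
--
--         if current_diff == 1:
--             max_len = i + 1
--
--         target = current_diff - 1
--         if target in first_occurrence:
--             length = i - first_occurrence[target]
--             if length > max_len:
--                 max_len = length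
--
--         if current_diff not in first_occurrence:
--             first_occurrence[current_diff] = i
--
--     return max_len
-- ===== SOURCE B (Python) =====
-- def getMaximumLength(sensorData):
--     # Brute force: A's one-pass first-occurrence map computes the longest
--     # subarray whose (#positives - #non-positives) balance is exactly +1;
--     # re-derive that directly by scanning every subarray.
--     n = len(sensorData)
--     max_len = 0
--     for i in range(n):
--         c = 0
--         for j in range(i, n):
--             c += 1 if sensorData[j] > 0 else -1
--             if c == 1 and j - i + 1 > max_len:
--                 max_len = j - i + 1
--     return max_len
-- ===== Notes on version B (the rewrite author's own statement) =====
-- stated objective: simpler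
-- what changed: Replaced the one-pass prefix-balance/first-occurrence dictionary algorithm by a plain nested scan over all subarrays that keeps a running balance and records the longest subarray with balance exactly +1 (which is what A computes).
import Mathlib
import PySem

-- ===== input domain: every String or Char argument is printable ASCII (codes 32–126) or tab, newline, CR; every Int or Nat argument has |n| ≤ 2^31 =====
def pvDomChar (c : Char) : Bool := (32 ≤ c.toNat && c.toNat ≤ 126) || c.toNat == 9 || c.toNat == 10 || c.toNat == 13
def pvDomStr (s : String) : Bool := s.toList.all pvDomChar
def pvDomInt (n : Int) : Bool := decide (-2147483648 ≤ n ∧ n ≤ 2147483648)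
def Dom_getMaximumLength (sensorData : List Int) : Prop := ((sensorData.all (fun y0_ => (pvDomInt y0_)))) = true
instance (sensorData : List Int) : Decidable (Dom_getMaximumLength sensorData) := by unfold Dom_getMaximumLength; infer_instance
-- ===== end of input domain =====

-- B replaces A's one-pass prefix-balance/first-occurrence map by a plain nested scan over all
-- subarrays (running balance, record length when balance = 1) — simpler, exactly equivalent.


-- ===== PORT A =====
-- one step of A's loop body, state = (first_occurrence, current_diff, max_len)
def aStep (s : PySem.Dict Int Int × Int × Int) (p : Int × Int) : PySem.Dict Int Int × Int × Int :=
  let fo := s.1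
  let cd := if p.2 > 0 then s.2.1 + 1 else s.2.1 - 1
  let ml := if cd = 1 then p.1 + 1 else s.2.2
  let ml := match fo.get? (cd - 1) with
    | some j => if p.1 - j > ml then p.1 - j else ml
    | none => ml
  let fo := if fo.contains cd then fo else fo.insert cd p.1
  (fo, cd, ml)

def getMaximumLength (sensorData : List Int) : Int :=
  ((PySem.List.enumerate sensorData 0).foldl aStep (PySem.Dict.empty, 0, 0)).2.2

-- ===== PORT B =====
-- inner loop body of B, state = (c, max_len)
def bInner (sensorData : List Int) (i : Int) (s : Int × Int) (j : Int) : Int × Int :=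
  let c := s.1 + (if PySem.List.pyGetD sensorData j 0 > 0 then 1 else -1)
  let ml := if c = 1 ∧ j - i + 1 > s.2 then j - i + 1 else s.2
  (c, ml)

def getMaximumLength_alt (sensorData : List Int) : Int :=
  let n : Int := sensorData.length
  (PySem.List.pyRange 0 n 1).foldl
    (fun ml i => ((PySem.List.pyRange i n 1).foldl (bInner sensorData i) (0, ml)).2) 0

-- ===== PRECONDITION & SPEC =====
def Spec_getMaximumLength (sensorData : List Int) (out : Int) : Prop := out = getMaximumLength_alt sensorData
instance (sensorData : List Int) (out : Int) : Decidable (Spec_getMaximumLength sensorData out) := by unfold Spec_getMaximumLength; infer_instance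

-- ===== CLAIM (what is proved, stated in full; the proofs are below) =====
def Claim_equal_getMaximumLength : Prop := ∀ (sensorData : List Int), Dom_getMaximumLength sensorData → Spec_getMaximumLength sensorData (getMaximumLength sensorData)

-- ===== LEMMAS AND PROOFS =====

-- value of one element in the running balance
def pvStep (v : Int) : Int := if v > 0 then 1 else -1

-- balance of the first k elements
def pvPre (xs : List Int) (k : Nat) : Int := ((xs.take k).map pvStep).sum

-- "r is the maximum of 0 and all lengths j - t of balance-1 segments (t, j]"
def MaxSpec (xs : List Int) (r : Int) : Prop :=
  0 ≤ r ∧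
  (∀ t j : Nat, t < j → j ≤ xs.length → pvPre xs j - pvPre xs t = 1 → (j : Int) - t ≤ r) ∧
  (r = 0 ∨ ∃ t j : Nat, t < j ∧ j ≤ xs.length ∧ pvPre xs j - pvPre xs t = 1 ∧ r = (j : Int) - t)

theorem MaxSpec_unique (xs : List Int) (r r' : Int)
    (h : MaxSpec xs r) (h' : MaxSpec xs r') : r = r' := by
  obtain ⟨h0, hub, hat⟩ := h
  obtain ⟨h0', hub', hat'⟩ := h'
  apply le_antisymm
  · rcases hat with h | ⟨t, j, htj, hjn, hs, rfl⟩
    · omega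
    · exact hub' t j htj hjn hs
  · rcases hat' with h | ⟨t, j, htj, hjn, hs, rfl⟩
    · omega
    · exact hub t j htj hjn hs

theorem pvPre_zero (xs : List Int) : pvPre xs 0 = 0 := by simp [pvPre]

theorem pvPre_append_le (xs : List Int) (x : Int) (j : Nat) (h : j ≤ xs.length) :
    pvPre (xs ++ [x]) j = pvPre xs j := by
  simp [pvPre, List.take_append_of_le_length h]

theorem pvPre_append_succ (xs : List Int) (x : Int) :
    pvPre (xs ++ [x]) (xs.length + 1) = pvPre xs xs.length + pvStep x := by
  simp [pvPre]

theorem pvPre_succ (xs : List Int) (a : Nat) (h : a < xs.length) :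
    pvPre xs (a + 1) = pvPre xs a + pvStep xs[a] := by
  unfold pvPre
  rw [List.take_succ_eq_append_getElem h, List.map_append, List.sum_append]
  simp

-- ========== A side ==========

-- the full invariant carried by A's fold
def AInv (xs : List Int) (s : PySem.Dict Int Int × Int × Int) : Prop :=
  s.2.1 = pvPre xs xs.length ∧
  (∀ v j, s.1.get? v = some j ↔
    ∃ t : Nat, t < xs.length ∧ (j : Int) = t ∧ pvPre xs (t + 1) = v ∧
      ∀ t' : Nat, t' < t → pvPre xs (t' + 1) ≠ v) ∧
  0 ≤ s.2.2 ∧ s.2.2 ≤ xs.length ∧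
  (∀ t j : Nat, t < j → j ≤ xs.length → pvPre xs j - pvPre xs t = 1 → (j : Int) - t ≤ s.2.2) ∧
  (s.2.2 = 0 ∨ ∃ t j : Nat, t < j ∧ j ≤ xs.length ∧ pvPre xs j - pvPre xs t = 1 ∧ s.2.2 = (j : Int) - t)

-- minimal witness: if some index t < n has balance v at t+1, then get? would find the least one
theorem exists_first (xs : List Int) (v : Int) (n : Nat)
    (h : ∃ t : Nat, t < n ∧ pvPre xs (t + 1) = v) :
    ∃ t0 : Nat, t0 < n ∧ pvPre xs (t0 + 1) = v ∧ ∀ t' : Nat, t' < t0 → pvPre xs (t' + 1) ≠ v := by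
  classical
  refine ⟨Nat.find h, (Nat.find_spec h).1, (Nat.find_spec h).2, ?_⟩
  intro t' ht' hv
  have hn : Nat.find h < n := (Nat.find_spec h).1
  exact Nat.find_min h ht' ⟨by omega, hv⟩

theorem AInv_nil : AInv [] (PySem.Dict.empty, 0, 0) := by
  refine ⟨by simp [pvPre], ?_, le_refl 0, by simp, ?_, Or.inl rfl⟩
  · intro v j
    simp [PySem.Dict.get?_empty]
  · intro t j htj hj
    simp at hj
    omega

theorem AInv_step (xs : List Int) (x : Int) (fo : PySem.Dict Int Int) (ml : Int)
    (hfo : ∀ v j, fo.get? v = some j ↔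
      ∃ t : Nat, t < xs.length ∧ (j : Int) = t ∧ pvPre xs (t + 1) = v ∧
        ∀ t' : Nat, t' < t → pvPre xs (t' + 1) ≠ v)
    (hml0 : 0 ≤ ml) (hmln : ml ≤ (xs.length : Int))
    (hub : ∀ t j : Nat, t < j → j ≤ xs.length → pvPre xs j - pvPre xs t = 1 → (j : Int) - t ≤ ml)
    (hat : ml = 0 ∨ ∃ t j : Nat, t < j ∧ j ≤ xs.length ∧ pvPre xs j - pvPre xs t = 1 ∧ ml = (j : Int) - t) :
    AInv (xs ++ [x]) (aStep (fo, pvPre xs xs.length, ml) ((xs.length : Int), x)) := by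
  classical
  have hlen : (xs ++ [x]).length = xs.length + 1 := by simp
  unfold aStep AInv
  dsimp only
  simp only [hlen]
  generalize hCdef : (if x > 0 then pvPre xs xs.length + 1 else pvPre xs xs.length - 1) = C
  have hC : pvPre (xs ++ [x]) (xs.length + 1) = C := by
    rw [← hCdef, pvPre_append_succ]; unfold pvStep; split_ifs <;> ring
  have hPle : ∀ t : Nat, t ≤ xs.length → pvPre (xs ++ [x]) t = pvPre xs t :=
    fun t ht => pvPre_append_le xs x t ht
  have hcontains : fo.contains C = true ↔ ∃ t : Nat, t < xs.length ∧ pvPre xs (t + 1) = C := by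
    constructor
    · intro hc
      rw [PySem.Dict.contains_eq_isSome_get?] at hc
      obtain ⟨j, hj⟩ := Option.isSome_iff_exists.mp hc
      obtain ⟨t, htn, _, hPt, _⟩ := (hfo C j).mp hj
      exact ⟨t, htn, hPt⟩
    · intro hex
      obtain ⟨t0, ht0, hP0, hmin⟩ := exists_first xs C xs.length hex
      have : fo.get? C = some ((t0 : Nat) : Int) := (hfo C _).mpr ⟨t0, ht0, rfl, hP0, hmin⟩
      rw [PySem.Dict.contains_eq_isSome_get?, this]
      rfl
  rcases hgt : fo.get? (C - 1) with _ | f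
  all_goals dsimp only
  -- facts about the looked-up first occurrence, in the `some` case
  case some =>
    obtain ⟨t0, ht0n, hft0, hPt0, hmint0⟩ := (hfo (C - 1) f).mp hgt
    refine ⟨hC.symm, ?_, ?_, ?_, ?_, ?_⟩
    · -- dictionary characterization
      intro v j
      by_cases hctn : fo.contains C = true
      · rw [if_pos hctn]
        constructor
        · rintro hj
          obtain ⟨t, htn, hjt, hPt, hmin⟩ := (hfo v j).mp hj
          refine ⟨t, by omega, hjt, by rw [hPle (t + 1) (by omega)]; exact hPt, ?_⟩
          intro t' ht' heq
          exact hmin t' ht' (by rw [← hPle (t' + 1) (by omega)]; exact heq)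
        · rintro ⟨t, htn1, hjt, hPt, hmin⟩
          by_cases ht : t < xs.length
          · refine (hfo v j).mpr ⟨t, ht, hjt, by rw [← hPle (t + 1) (by omega)]; exact hPt, ?_⟩
            intro t' ht' heq
            exact hmin t' ht' (by rw [hPle (t' + 1) (by omega)]; exact heq)
          · exfalso
            have hteq : t = xs.length := by omega
            subst hteq
            have hvC : v = C := by rw [← hPt, hC]
            obtain ⟨t1, ht1, hP1⟩ := hcontains.mp hctn
            exact hmin t1 ht1 (by rw [hPle (t1 + 1) (by omega), hP1, hvC]) 
      · rw [if_neg hctn, PySem.Dict.get?_insert]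
        by_cases hv : v = C
        · subst hv
          rw [if_pos rfl]
          constructor
          · rintro hj
            have hjn : j = (xs.length : Int) := by injection hj; omega
            refine ⟨xs.length, by omega, by rw [hjn], hC, ?_⟩
            intro t' ht' heq
            exact hctn (hcontains.mpr ⟨t', ht', by rw [← hPle (t' + 1) (by omega)]; exact heq⟩)
          · rintro ⟨t, htn1, hjt, hPt, hmin⟩
            by_cases ht : t < xs.length
            · exfalso
              exact hctn (hcontains.mpr ⟨t, ht, by rw [← hPle (t + 1) (by omega)]; exact hPt⟩)
            · have hteq : t = xs.length := by omega
              subst hteq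
              rw [hjt]
        · rw [if_neg hv]
          constructor
          · rintro hj
            obtain ⟨t, htn, hjt, hPt, hmin⟩ := (hfo v j).mp hj
            refine ⟨t, by omega, hjt, by rw [hPle (t + 1) (by omega)]; exact hPt, ?_⟩
            intro t' ht' heq
            exact hmin t' ht' (by rw [← hPle (t' + 1) (by omega)]; exact heq)
          · rintro ⟨t, htn1, hjt, hPt, hmin⟩
            by_cases ht : t < xs.length
            · refine (hfo v j).mpr ⟨t, ht, hjt, by rw [← hPle (t + 1) (by omega)]; exact hPt, ?_⟩
              intro t' ht' heq
              exact hmin t' ht' (by rw [hPle (t' + 1) (by omega)]; exact heq)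
            · exfalso
              have hteq : t = xs.length := by omega
              subst hteq
              exact hv (by rw [← hPt, hC])
    · -- 0 ≤ ml2
      have hfn : f < (xs.length : Int) := by rw [hft0]; exact_mod_cast ht0n
      have hf0 : 0 ≤ f := by rw [hft0]; exact Int.natCast_nonneg t0
      split_ifs <;> linarith [Int.natCast_nonneg xs.length]
    · -- ml2 ≤ length + 1
      have hfn : f < (xs.length : Int) := by rw [hft0]; exact_mod_cast ht0n
      have hf0 : 0 ≤ f := by rw [hft0]; exact Int.natCast_nonneg t0
      push_cast
      split_ifs <;> linarith [Int.natCast_nonneg xs.length]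
    · -- upper bound
      intro t j htj hjn1 hbal
      by_cases hj : j ≤ xs.length
      · rw [hPle j hj, hPle t (by omega)] at hbal
        have hjt : (j : Int) - (t : Int) ≤ ml := hub t j htj hj hbal
        have hjq : (j : Int) ≤ (xs.length : Int) := by exact_mod_cast hj
        have htq : (0 : Int) ≤ (t : Int) := Int.natCast_nonneg t
        split_ifs <;> linarith
      · have hjeq : j = xs.length + 1 := by omega
        subst hjeq
        rw [hC] at hbal
        rcases Nat.eq_zero_or_pos t with ht0 | htpos
        · subst ht0
          rw [hPle 0 (by omega), pvPre_zero] at hbal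
          have hC1 : C = 1 := by linarith
          rw [if_pos hC1]
          push_cast
          split_ifs <;> linarith
        · obtain ⟨t'', rfl⟩ : ∃ t'', t = t'' + 1 := ⟨t - 1, by omega⟩
          have ht''n : t'' < xs.length := by omega
          rw [hPle (t'' + 1) (by omega)] at hbal
          have hPt'' : pvPre xs (t'' + 1) = C - 1 := by linarith
          have ht0le : t0 ≤ t'' := by
            by_contra hgtc
            exact hmint0 t'' (by omega) hPt''
          have hf : f = ((t0 : Nat) : Int) := hft0
          have h1c : ((t0 : Nat) : Int) ≤ ((t'' : Nat) : Int) := by exact_mod_cast ht0le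
          have h2c : ((t'' : Nat) : Int) < (xs.length : Int) := by exact_mod_cast ht''n
          have h3c : (0 : Int) ≤ ((t'' : Nat) : Int) := Int.natCast_nonneg t''
          push_cast
          split_ifs <;> linarith
    · -- attained
      have hf : f = ((t0 : Nat) : Int) := hft0
      by_cases hbig : (xs.length : Int) - f > (if C = 1 then (xs.length : Int) + 1 else ml)
      · rw [if_pos hbig]
        refine Or.inr ⟨t0 + 1, xs.length + 1, by omega, by omega, ?_, by push_cast; omega⟩
        rw [hC, hPle (t0 + 1) (by omega), hPt0]
        ring
      · rw [if_neg hbig]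
        by_cases hC1 : C = 1
        · rw [if_pos hC1]
          refine Or.inr ⟨0, xs.length + 1, by omega, by omega, ?_, by push_cast; omega⟩
          rw [hC, hPle 0 (by omega), pvPre_zero, hC1]
          ring
        · rw [if_neg hC1]
          rcases hat with h0 | ⟨t, j, htj, hjle, hbal, hval⟩
          · exact Or.inl h0
          · refine Or.inr ⟨t, j, htj, by omega, ?_, hval⟩
            rw [hPle j (by omega), hPle t (by omega)]
            exact hbal
  case none =>
    refine ⟨hC.symm, ?_, ?_, ?_, ?_, ?_⟩
    · -- dictionary characterization (same argument as above)
      intro v j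
      by_cases hctn : fo.contains C = true
      · rw [if_pos hctn]
        constructor
        · rintro hj
          obtain ⟨t, htn, hjt, hPt, hmin⟩ := (hfo v j).mp hj
          refine ⟨t, by omega, hjt, by rw [hPle (t + 1) (by omega)]; exact hPt, ?_⟩
          intro t' ht' heq
          exact hmin t' ht' (by rw [← hPle (t' + 1) (by omega)]; exact heq)
        · rintro ⟨t, htn1, hjt, hPt, hmin⟩
          by_cases ht : t < xs.length
          · refine (hfo v j).mpr ⟨t, ht, hjt, by rw [← hPle (t + 1) (by omega)]; exact hPt, ?_⟩
            intro t' ht' heq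
            exact hmin t' ht' (by rw [hPle (t' + 1) (by omega)]; exact heq)
          · exfalso
            have hteq : t = xs.length := by omega
            subst hteq
            have hvC : v = C := by rw [← hPt, hC]
            obtain ⟨t1, ht1, hP1⟩ := hcontains.mp hctn
            exact hmin t1 ht1 (by rw [hPle (t1 + 1) (by omega), hP1, hvC]) 
      · rw [if_neg hctn, PySem.Dict.get?_insert]
        by_cases hv : v = C
        · subst hv
          rw [if_pos rfl]
          constructor
          · rintro hj
            have hjn : j = (xs.length : Int) := by injection hj; omega
            refine ⟨xs.length, by omega, by rw [hjn], hC, ?_⟩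
            intro t' ht' heq
            exact hctn (hcontains.mpr ⟨t', ht', by rw [← hPle (t' + 1) (by omega)]; exact heq⟩)
          · rintro ⟨t, htn1, hjt, hPt, hmin⟩
            by_cases ht : t < xs.length
            · exfalso
              exact hctn (hcontains.mpr ⟨t, ht, by rw [← hPle (t + 1) (by omega)]; exact hPt⟩)
            · have hteq : t = xs.length := by omega
              subst hteq
              rw [hjt]
        · rw [if_neg hv]
          constructor
          · rintro hj
            obtain ⟨t, htn, hjt, hPt, hmin⟩ := (hfo v j).mp hj
            refine ⟨t, by omega, hjt, by rw [hPle (t + 1) (by omega)]; exact hPt, ?_⟩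
            intro t' ht' heq
            exact hmin t' ht' (by rw [← hPle (t' + 1) (by omega)]; exact heq)
          · rintro ⟨t, htn1, hjt, hPt, hmin⟩
            by_cases ht : t < xs.length
            · refine (hfo v j).mpr ⟨t, ht, hjt, by rw [← hPle (t + 1) (by omega)]; exact hPt, ?_⟩
              intro t' ht' heq
              exact hmin t' ht' (by rw [hPle (t' + 1) (by omega)]; exact heq)
            · exfalso
              have hteq : t = xs.length := by omega
              subst hteq
              exact hv (by rw [← hPt, hC])
    · -- 0 ≤ ml1
      split_ifs <;> linarith [Int.natCast_nonneg xs.length]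
    · -- ml1 ≤ length + 1
      push_cast
      split_ifs <;> linarith [Int.natCast_nonneg xs.length]
    · -- upper bound
      intro t j htj hjn1 hbal
      by_cases hj : j ≤ xs.length
      · rw [hPle j hj, hPle t (by omega)] at hbal
        have hjt : (j : Int) - (t : Int) ≤ ml := hub t j htj hj hbal
        have hjq : (j : Int) ≤ (xs.length : Int) := by exact_mod_cast hj
        have htq : (0 : Int) ≤ (t : Int) := Int.natCast_nonneg t
        split_ifs <;> linarith
      · have hjeq : j = xs.length + 1 := by omega
        subst hjeq
        rw [hC] at hbal
        rcases Nat.eq_zero_or_pos t with ht0 | htpos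
        · subst ht0
          rw [hPle 0 (by omega), pvPre_zero] at hbal
          have hC1 : C = 1 := by linarith
          rw [if_pos hC1]
          push_cast
          linarith
        · exfalso
          obtain ⟨t'', rfl⟩ : ∃ t'', t = t'' + 1 := ⟨t - 1, by omega⟩
          have ht''n : t'' < xs.length := by omega
          rw [hPle (t'' + 1) (by omega)] at hbal
          have hPt'' : pvPre xs (t'' + 1) = C - 1 := by linarith
          obtain ⟨u0, hu0, hPu0, humin⟩ := exists_first xs (C - 1) xs.length ⟨t'', ht''n, hPt''⟩
          have : fo.get? (C - 1) = some ((u0 : Nat) : Int) :=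
            (hfo (C - 1) _).mpr ⟨u0, hu0, rfl, hPu0, humin⟩
          rw [hgt] at this
          simp at this
    · -- attained
      by_cases hC1 : C = 1
      · rw [if_pos hC1]
        refine Or.inr ⟨0, xs.length + 1, by omega, by omega, ?_, by push_cast; omega⟩
        rw [hC, hPle 0 (by omega), pvPre_zero, hC1]
        ring
      · rw [if_neg hC1]
        rcases hat with h0 | ⟨t, j, htj, hjle, hbal, hval⟩
        · exact Or.inl h0
        · refine Or.inr ⟨t, j, htj, by omega, ?_, hval⟩
          rw [hPle j (by omega), hPle t (by omega)]
          exact hbal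

theorem AInv_all (xs : List Int) :
    AInv xs ((PySem.List.enumerate xs 0).foldl aStep (PySem.Dict.empty, 0, 0)) := by
  induction xs using List.reverseRecOn with
  | nil => simpa [PySem.List.enumerate_nil] using AInv_nil
  | append_singleton ys y ih =>
    rcases hst : ((PySem.List.enumerate ys 0).foldl aStep (PySem.Dict.empty, 0, 0)) with ⟨d, c, m⟩
    rw [hst] at ih
    obtain ⟨hcd, hfo, hml0, hmln, hub, hat⟩ := ih
    dsimp only at hcd hfo hml0 hmln hub hat
    subst hcd
    have hstep := AInv_step ys y d m hfo hml0 hmln hub hat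
    rw [PySem.List.enumerate_append, List.foldl_append, hst]
    simp only [PySem.List.enumerate_cons, PySem.List.enumerate_nil, List.foldl_cons, List.foldl_nil]
    have h0 : (0 : Int) + (ys.length : Int) = (ys.length : Int) := by ring
    rw [h0]
    exact hstep

theorem A_maxspec (xs : List Int) : MaxSpec xs (getMaximumLength xs) := by
  obtain ⟨_, _, h0, _, hub, hat⟩ := AInv_all xs
  exact ⟨h0, hub, hat⟩

-- ========== B side ==========

-- result of B's inner loop from index a with state (c, m)
def innerRun (xs : List Int) (i a c m : Int) : Int :=
  ((PySem.List.pyRange a (xs.length : Int) 1).foldl (bInner xs i) (c, m)).2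

-- result of B's outer loop from index a with accumulator m
def outerRun (xs : List Int) (a m : Int) : Int :=
  (PySem.List.pyRange a (xs.length : Int) 1).foldl
    (fun ml i => ((PySem.List.pyRange i (xs.length : Int) 1).foldl (bInner xs i) (0, ml)).2) m

theorem inner_spec (xs : List Int) (i : Nat) :
    ∀ (k a : Nat), xs.length - a = k → i ≤ a → a ≤ xs.length → ∀ m : Int,
    m ≤ innerRun xs i a (pvPre xs a - pvPre xs i) m ∧
    (∀ j : Nat, a ≤ j → j < xs.length → pvPre xs (j + 1) - pvPre xs i = 1 →
      (j : Int) - i + 1 ≤ innerRun xs i a (pvPre xs a - pvPre xs i) m) ∧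
    (innerRun xs i a (pvPre xs a - pvPre xs i) m = m ∨
      ∃ j : Nat, a ≤ j ∧ j < xs.length ∧ pvPre xs (j + 1) - pvPre xs i = 1 ∧
        innerRun xs i a (pvPre xs a - pvPre xs i) m = (j : Int) - i + 1) := by
  intro k
  induction k with
  | zero =>
    intro a hk _ han m
    have ha : a = xs.length := by omega
    subst ha
    unfold innerRun
    rw [PySem.List.pyRange_one_eq_nil (le_refl _)]
    exact ⟨le_refl m, by intro j hj hjn _; omega, Or.inl rfl⟩
  | succ k ih =>
    intro a hk hia han m
    have ha : a < xs.length := by omega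
    have hcons : PySem.List.pyRange (a : Int) (xs.length : Int) 1
        = (a : Int) :: PySem.List.pyRange ((a : Int) + 1) (xs.length : Int) 1 :=
      PySem.List.pyRange_one_cons (by exact_mod_cast ha)
    have hget : PySem.List.pyGetD xs ((a : Nat) : Int) 0 = xs[a] := by
      simp [PySem.List.pyGetD_natCast, List.getElem?_eq_getElem ha]
    have hstep : bInner xs (i : Int) (pvPre xs a - pvPre xs i, m) ((a : Nat) : Int)
        = (pvPre xs (a + 1) - pvPre xs i,
           if pvPre xs (a + 1) - pvPre xs i = 1 ∧ (a : Int) - i + 1 > m then (a : Int) - i + 1 else m) := by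
      have hc : pvPre xs a - pvPre xs i + (if xs[a] > 0 then (1 : Int) else -1)
          = pvPre xs (a + 1) - pvPre xs i := by
        rw [pvPre_succ xs a ha]; unfold pvStep; ring
      unfold bInner
      simp only [hget, hc]
    set m' := if pvPre xs (a + 1) - pvPre xs i = 1 ∧ (a : Int) - i + 1 > m then (a : Int) - i + 1 else m with hm'
    have hrun : innerRun xs i a (pvPre xs a - pvPre xs i) m
        = innerRun xs i ((a : Int) + 1) (pvPre xs (a + 1) - pvPre xs i) m' := by
      unfold innerRun
      rw [hcons, List.foldl_cons, hstep]
    have hmm' : m ≤ m' := by rw [hm']; split_ifs <;> omega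
    obtain ⟨h1, h2, h3⟩ := ih (a + 1) (by omega) (by omega) (by omega) m'
    push_cast at h1 h2 h3
    rw [hrun]
    refine ⟨le_trans hmm' h1, ?_, ?_⟩
    · intro j hj hjn hbal
      by_cases hje : j = a
      · subst hje
        have hle : ((j : Int) - i + 1) ≤ m' := by rw [hm']; split_ifs with hc <;> simp_all
        exact le_trans hle h1
      · exact h2 j (by omega) hjn hbal
    · rcases h3 with h | ⟨j, hj1, hj2, hj3, hj4⟩
      · by_cases hc : pvPre xs (a + 1) - pvPre xs i = 1 ∧ (a : Int) - i + 1 > m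
        · have hv : m' = (a : Int) - i + 1 := by rw [hm']; exact if_pos hc
          exact Or.inr ⟨a, le_refl a, ha, hc.1, by rw [h, hv]⟩
        · have hv : m' = m := by rw [hm']; exact if_neg hc
          exact Or.inl (by rw [h, hv])
      · exact Or.inr ⟨j, by omega, hj2, hj3, hj4⟩

theorem outer_spec (xs : List Int) :
    ∀ (k a : Nat), xs.length - a = k → a ≤ xs.length → ∀ m : Int,
    m ≤ outerRun xs a m ∧
    (∀ i j : Nat, a ≤ i → i ≤ j → j < xs.length → pvPre xs (j + 1) - pvPre xs i = 1 →
      (j : Int) - i + 1 ≤ outerRun xs a m) ∧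
    (outerRun xs a m = m ∨ ∃ i j : Nat, a ≤ i ∧ i ≤ j ∧ j < xs.length ∧
      pvPre xs (j + 1) - pvPre xs i = 1 ∧ outerRun xs a m = (j : Int) - i + 1) := by
  intro k
  induction k with
  | zero =>
    intro a hk han m
    have ha : a = xs.length := by omega
    subst ha
    unfold outerRun
    rw [PySem.List.pyRange_one_eq_nil (le_refl _)]
    exact ⟨le_refl m, by intro i j hi hij hjn _; omega, Or.inl rfl⟩
  | succ k ih =>
    intro a hk han m
    have ha : a < xs.length := by omega
    have hcons : PySem.List.pyRange (a : Int) (xs.length : Int) 1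
        = (a : Int) :: PySem.List.pyRange ((a : Int) + 1) (xs.length : Int) 1 :=
      PySem.List.pyRange_one_cons (by exact_mod_cast ha)
    have hk' : xs.length - (a + 1) = k := by omega
    have han' : a + 1 ≤ xs.length := by omega
    have hz : pvPre xs a - pvPre xs a = 0 := by ring
    have hinner := inner_spec xs a (xs.length - a) a rfl (le_refl a) (le_of_lt ha) m
    rw [hz] at hinner
    obtain ⟨hi1, hi2, hi3⟩ := hinner
    generalize hMdef : innerRun xs (a : Int) (a : Int) 0 m = m' at hi1 hi2 hi3
    have hrun : outerRun xs (a : Int) m = outerRun xs ((a : Int) + 1) m' := by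
      rw [← hMdef]
      unfold outerRun innerRun
      rw [hcons, List.foldl_cons]
      rw [hcons]
    obtain ⟨h1, h2, h3⟩ := ih (a + 1) hk' han' m'
    push_cast at h1 h2 h3
    rw [hrun]
    refine ⟨le_trans hi1 h1, ?_, ?_⟩
    · intro i j hai hij hjn hbal
      by_cases hie : i = a
      · subst hie
        exact le_trans (hi2 j hij hjn hbal) h1
      · exact h2 i j (by omega) hij hjn hbal
    · rcases h3 with h | ⟨i, j, hi', hij, hjn, hbal, hv⟩
      · rw [h]
        rcases hi3 with h' | ⟨j, hj1, hj2, hj3, hj4⟩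
        · exact Or.inl h'
        · exact Or.inr ⟨a, j, le_refl a, hj1, hj2, hj3, hj4⟩
      · exact Or.inr ⟨i, j, by omega, hij, hjn, hbal, hv⟩

theorem B_maxspec (xs : List Int) : MaxSpec xs (getMaximumLength_alt xs) := by
  have halt : getMaximumLength_alt xs = outerRun xs ((0 : Nat) : Int) 0 := by
    unfold getMaximumLength_alt outerRun
    push_cast
    rfl
  obtain ⟨h1, h2, h3⟩ := outer_spec xs xs.length 0 rfl (by omega) 0
  rw [halt]
  refine ⟨h1, ?_, ?_⟩
  · intro t j htj hjn hbal
    obtain ⟨j', rfl⟩ : ∃ j', j = j' + 1 := ⟨j - 1, by omega⟩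
    have := h2 t j' (by omega) (by omega) (by omega) hbal
    push_cast at this ⊢
    omega
  · rcases h3 with h | ⟨i, j, _, hij, hjn, hbal, hv⟩
    · exact Or.inl h
    · refine Or.inr ⟨i, j + 1, by omega, by omega, hbal, ?_⟩
      push_cast at hv ⊢
      omega

-- ===== VERDICT (by name: the statement is the Claim_ definition above) =====
theorem getMaximumLength_spec : Claim_equal_getMaximumLength := by
  intro xs _
  unfold Spec_getMaximumLength
  exact MaxSpec_unique xs _ _ (A_maxspec xs) (B_maxspec xs)
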